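-- pv_equiv track=rewrite | github.com/patrickwong28/Searchly | inverse_index/utils/compute_attributes.py | compute_position
-- ===== SOURCE A (Python) =====
-- def compute_position(token_list: list[str]) -> dict:
--     positions = {}
--     current_position = 1
--     for token in token_list:
--         if token not in positions:
--             positions[token] = []
--         positions[token].append(current_position)
--         current_position += 1
--
--     return positions
-- ===== SOURCE B (Python) =====
-- def compute_position(token_list: list[str]) -> dict:
--     return {
--         token: [i for i, t in enumerate(token_list, 1) if t == token]
--         for token in dict.fromkeys(token_list)
--     }
-- ===== Notes on version B (the rewrite author's own statement) =====
-- stated objective: simpler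
-- what changed: Replaces the single accumulating pass with a mutable dict by a group-by: dedup the tokens once (dict.fromkeys) and compute each key's position list with one comprehension over enumerate(token_list, 1).
import Mathlib
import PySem

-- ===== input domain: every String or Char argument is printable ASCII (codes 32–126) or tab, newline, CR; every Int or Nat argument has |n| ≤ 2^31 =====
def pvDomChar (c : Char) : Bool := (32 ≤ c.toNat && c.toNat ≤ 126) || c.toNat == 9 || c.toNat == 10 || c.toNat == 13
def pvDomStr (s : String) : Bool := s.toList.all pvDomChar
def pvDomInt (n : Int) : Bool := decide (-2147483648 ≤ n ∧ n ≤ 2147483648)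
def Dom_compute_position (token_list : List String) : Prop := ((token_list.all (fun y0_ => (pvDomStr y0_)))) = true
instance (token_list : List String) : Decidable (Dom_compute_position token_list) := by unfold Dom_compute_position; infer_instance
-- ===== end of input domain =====

-- B replaces A's single accumulating pass over a mutable dict by a group-by: dedup the tokens, then one comprehension per distinct token; objective: simpler.

-- ===== PORT A =====
-- literal transliteration of A: fold over the tokens carrying (positions dict, current_position)
def compute_position (token_list : List String) : List (String × List Int) :=
  (token_list.foldl
    (fun (st : PySem.Dict String (List Int) × Int) token =>
      let positions := if st.1.contains token then st.1 else st.1.insert token []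
      (positions.modify token [] (fun l => l ++ [st.2]), st.2 + 1))
    (PySem.Dict.empty, 1)).1.items

-- ===== PORT B =====
-- literal transliteration of B: for each first-occurrence-distinct token (dict.fromkeys), its 1-indexed positions
def compute_position_alt (token_list : List String) : List (String × List Int) :=
  (PySem.List.dedup token_list).map (fun token =>
    (token,
      ((PySem.List.enumerate token_list 1).filter (fun p => p.2 == token)).map (fun p => p.1)))

-- ===== PRECONDITION & SPEC =====
def Spec_compute_position (token_list : List String) (out : List (String × List Int)) : Prop := out = compute_position_alt token_list
instance (token_list : List String) (out : List (String × List Int)) : Decidable (Spec_compute_position token_list out) := by unfold Spec_compute_position; infer_instance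

-- ===== CLAIM (what is proved, stated in full; the proofs are below) =====
def Claim_equal_compute_position : Prop := ∀ (token_list : List String), Dom_compute_position token_list → Spec_compute_position token_list (compute_position token_list)

-- ===== LEMMAS AND PROOFS =====

def pvL (tl : List String) : List (String × Int) :=
  (PySem.List.enumerate tl 1).map (fun p => (p.2, p.1))

def pvStep (d : PySem.Dict String (List Int)) (p : String × Int) : PySem.Dict String (List Int) :=
  d.modify p.1 [] (fun l => l ++ [p.2])

def pvPos (tl : List String) (k : String) : List Int :=
  ((pvL tl).filter (fun p => p.1 == k)).map (fun p => p.2)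

theorem pv_mem_dedup (tl : List String) (x : String) : x ∈ PySem.List.dedup tl ↔ x ∈ tl :=
  PySem.List.mem_dedup tl x

theorem pv_fold_enum (tl : List String) (c : Int) (d : PySem.Dict String (List Int)) :
    (tl.foldl
      (fun (st : PySem.Dict String (List Int) × Int) token =>
        (st.1.modify token [] (fun l => l ++ [st.2]), st.2 + 1)) (d, c)).1
    = ((PySem.List.enumerate tl c).map (fun p => (p.2, p.1))).foldl pvStep d := by
  induction tl generalizing c d with
  | nil => simp [PySem.List.enumerate]
  | cons x xs ih => simp [PySem.List.enumerate_cons, pvStep, ih]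

theorem pv_enum_snoc (xs : List String) (y : String) (s : Int) :
    PySem.List.enumerate (xs ++ [y]) s = PySem.List.enumerate xs s ++ [(s + xs.length, y)] := by
  induction xs generalizing s with
  | nil => simp [PySem.List.enumerate_cons, PySem.List.enumerate]
  | cons x xs ih =>
      simp [PySem.List.enumerate_cons, ih]
      omega

theorem pv_fst_pvL (tl : List String) : (pvL tl).map (fun p => p.1) = tl := by
  simp [pvL, List.map_map, Function.comp_def, PySem.List.map_snd_enumerate]

theorem pv_dedup_snoc (tl : List String) (t : String) :
    PySem.List.dedup (tl ++ [t]) =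
      if t ∈ tl then PySem.List.dedup tl else PySem.List.dedup tl ++ [t] := by
  have h1 : PySem.List.dedup (tl ++ [t]) = PySem.Set.add (PySem.List.dedup tl) t := by
    simp only [PySem.List.dedup, PySem.Set.ofList, List.foldl_append, List.foldl_cons, List.foldl_nil]
  rw [h1, PySem.Set.add]
  by_cases h : t ∈ tl
  · have hc : PySem.Set.contains (PySem.List.dedup tl) t = true := by simpa [PySem.Set.contains] using h
    rw [hc]
    simp [h]
  · have hc : PySem.Set.contains (PySem.List.dedup tl) t = false := by simpa [PySem.Set.contains] using h
    rw [hc]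
    simp [h]

theorem pv_items (tl : List String) :
    ((pvL tl).foldl pvStep PySem.Dict.empty).items
      = (PySem.List.dedup tl).map (fun k => (k, pvPos tl k)) := by
  induction tl using List.reverseRecOn with
  | nil => simp [pvL, PySem.List.enumerate, PySem.List.dedup, PySem.Set.ofList, PySem.Dict.empty]
  | append_singleton tl t ih =>
      have hL : pvL (tl ++ [t]) = pvL tl ++ [(t, (1 + (tl.length : Int)))] := by
        simp [pvL, pv_enum_snoc]
      have hn : pvPos (tl ++ [t]) = fun k => pvPos tl k ++ (if t == k then [(1 + (tl.length : Int))] else []) := by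
        funext k
        simp only [pvPos, hL, List.filter_append, List.map_append]
        congr 1
        by_cases h : t = k
        · simp [List.filter, h]
        · have hf : (t == k) = false := by simp [h]
          simp [List.filter, hf]
      have hgetD : ((pvL tl).foldl pvStep PySem.Dict.empty).getD t [] = pvPos tl t := by
        simpa [pvPos, pvStep] using PySem.Dict.getD_foldl_modify_append (pvL tl) PySem.Dict.empty t
      have hcont : ((pvL tl).foldl pvStep PySem.Dict.empty).contains t = decide (t ∈ tl) := by
        simp only [PySem.Dict.contains, ih, List.any_map, Function.comp_def]
        by_cases h : t ∈ tl
        · simp only [h, decide_true, List.any_eq_true]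
          exact ⟨t, (pv_mem_dedup tl t).mpr h, by simp⟩
        · simp only [h, decide_false]
          rw [← Bool.not_eq_true, List.any_eq_true]
          rintro ⟨k, hk, hkt⟩
          have : k = t := by simpa using hkt
          exact h (this ▸ (pv_mem_dedup tl k).mp hk)
      rw [hL, List.foldl_append, List.foldl_cons, List.foldl_nil]
      by_cases hmem : t ∈ tl
      · have hc : ((pvL tl).foldl pvStep PySem.Dict.empty).contains t = true := by simp [hcont, hmem]
        show (((pvL tl).foldl pvStep PySem.Dict.empty).modify t [] (fun l => l ++ [(1 + (tl.length : Int))])).items = _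
        rw [PySem.Dict.modify, hgetD, PySem.Dict.items_insert_of_contains _ _ hc, ih, List.map_map,
          pv_dedup_snoc, if_pos hmem, hn]
        apply List.map_congr_left
        intro k _
        by_cases hkt : k = t
        · simp [hkt]
        · simp [hkt, Ne.symm hkt]
      · have hc : ((pvL tl).foldl pvStep PySem.Dict.empty).contains t = false := by simp [hcont, hmem]
        have hpos0 : pvPos tl t = [] := by
          simp only [pvPos, List.map_eq_nil_iff, List.filter_eq_nil_iff]
          intro p hp
          have : p.1 ∈ tl := pv_fst_pvL tl ▸ List.mem_map_of_mem hp
          simp only [beq_iff_eq]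
          exact fun he => hmem (he ▸ this)
        show (((pvL tl).foldl pvStep PySem.Dict.empty).modify t [] (fun l => l ++ [(1 + (tl.length : Int))])).items = _
        rw [PySem.Dict.modify, hgetD, PySem.Dict.items_insert_of_not_contains _ _ hc, ih,
          pv_dedup_snoc, if_neg hmem, List.map_append, hn]
        congr 1
        · apply List.map_congr_left
          intro k hk
          have hk' : k ∈ tl := (pv_mem_dedup tl k).mp hk
          have hne : (t == k) = false := by
            simp only [beq_eq_false_iff_ne, ne_eq]
            exact fun he => hmem (he ▸ hk')
          simp [hne]
        · simp [hpos0]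

-- A's "if absent, insert an empty list; then append" step equals a single modify-append step
theorem pv_dict_ext (d1 d2 : PySem.Dict String (List Int)) (h : d1.items = d2.items) : d1 = d2 := by
  cases d1; cases d2; simpa [PySem.Dict.items] using h

theorem pv_step_eq (d : PySem.Dict String (List Int)) (t : String) (c : Int) :
    (if d.contains t then d else d.insert t []).modify t [] (fun l => l ++ [c])
      = d.modify t [] (fun l => l ++ [c]) := by
  by_cases h : d.contains t
  · simp [h]
  · have hc : d.contains t = false := Bool.of_not_eq_true h
    have hnomem : ∀ p ∈ d.items, (p.1 == t) = false := by
      intro p hp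
      by_contra hne
      have : d.contains t = true := by
        simp only [PySem.Dict.contains, List.any_eq_true]
        exact ⟨p, hp, by simpa using hne⟩
      simp [this] at hc
    rw [if_neg h]
    have h1 : (d.insert t ([] : List Int)).items = d.items ++ [(t, [])] :=
      PySem.Dict.items_insert_of_not_contains d _ hc
    have h2 : (d.insert t ([] : List Int)).contains t = true := by
      simp [PySem.Dict.contains, h1]
    simp only [PySem.Dict.modify, PySem.Dict.getD_insert_self,
      PySem.Dict.getD_of_not_contains d _ hc, List.nil_append]
    apply pv_dict_ext
    rw [PySem.Dict.items_insert_of_contains _ _ h2, h1, List.map_append,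
      PySem.Dict.items_insert_of_not_contains _ _ hc]
    have hid : List.map (fun p => if (p.1 == t) = true then (t, [c]) else p) d.items = d.items := by
      conv_rhs => rw [← List.map_id d.items]
      apply List.map_congr_left
      intro p hp
      simp [hnomem p hp]
    simpa using hid

-- ===== VERDICT (by name: the statement is the Claim_ definition above) =====
theorem compute_position_spec : Claim_equal_compute_position := by
  intro tl _
  show compute_position tl = compute_position_alt tl
  unfold compute_position compute_position_alt
  have hstep : (fun (st : PySem.Dict String (List Int) × Int) token =>
      let positions := if st.1.contains token then st.1 else st.1.insert token []
      (positions.modify token [] (fun l => l ++ [st.2]), st.2 + 1))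
    = fun (st : PySem.Dict String (List Int) × Int) token =>
        (st.1.modify token [] (fun l => l ++ [st.2]), st.2 + 1) := by
    funext st token
    simp only
    rw [pv_step_eq]
  rw [hstep, pv_fold_enum]
  have hitems := pv_items tl
  simp only [pvL] at hitems
  rw [hitems]
  have hbridge : ∀ k, pvPos tl k
      = ((PySem.List.enumerate tl 1).filter (fun p => p.2 == k)).map (fun p => p.1) := by
    intro k
    simp [pvPos, pvL, List.filter_map, List.map_map, Function.comp_def]
  simp only [hbridge]
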